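-- pv_equiv track=rewrite | github.com/Aayush-W/Barclays-Hack-O-Hire | sar-audit-engine/core/sar_report_formatter.py | _flow_of_funds
-- ===== SOURCE A (Python) =====
-- from collections import Counter
-- from typing import Any, Dict, List, Optional
--
-- def _flow_of_funds(transactions: List[Dict[str, Any]]) -> str:
--     flow_counter = Counter()
--     for tx in transactions:
--         src = str(tx.get("from_account") or "UNKNOWN")
--         dst = str(tx.get("to_account") or "UNKNOWN")
--         flow_counter[(src, dst)] += 1
--     top_flows = flow_counter.most_common(5)
--     if not top_flows:
--         return "No clear fund flow could be derived from provided records."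
--     flow_parts = [f"{src} -> {dst} (count={count})" for (src, dst), count in top_flows]
--     return "; ".join(flow_parts)
-- ===== SOURCE B (Python) =====
-- def _flow_of_funds(transactions):
--     # materialise the (src, dst) pair of every transaction
--     pairs = [(str(tx.get("from_account") or "UNKNOWN"),
--               str(tx.get("to_account") or "UNKNOWN")) for tx in transactions]
--     if not pairs:
--         return "No clear fund flow could be derived from provided records."
--     remaining = list(dict.fromkeys(pairs))  # distinct pairs, first-occurrence order
--     parts = []
--     for _ in range(5):
--         if not remaining:
--             break
--         best = remaining[0]
--         for p in remaining[1:]: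
--             if pairs.count(best) < pairs.count(p):
--                 best = p
--         remaining.remove(best)
--         parts.append(f"{best[0]} -> {best[1]} (count={pairs.count(best)})")
--     return "; ".join(parts)
-- ===== Notes on version B (the rewrite author's own statement) =====
-- stated objective: alternative
-- what changed: B drops the Counter/dict aggregation entirely: it materialises the (src,dst) pair list, dedups it in first-occurrence order via dict.fromkeys, and extracts the top 5 by a bounded selection loop (repeated first-maximum scan with counts recomputed by pairs.count and list.remove), instead of A's Counter increment loop plus heap-based most_common(5).
import Mathlib
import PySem

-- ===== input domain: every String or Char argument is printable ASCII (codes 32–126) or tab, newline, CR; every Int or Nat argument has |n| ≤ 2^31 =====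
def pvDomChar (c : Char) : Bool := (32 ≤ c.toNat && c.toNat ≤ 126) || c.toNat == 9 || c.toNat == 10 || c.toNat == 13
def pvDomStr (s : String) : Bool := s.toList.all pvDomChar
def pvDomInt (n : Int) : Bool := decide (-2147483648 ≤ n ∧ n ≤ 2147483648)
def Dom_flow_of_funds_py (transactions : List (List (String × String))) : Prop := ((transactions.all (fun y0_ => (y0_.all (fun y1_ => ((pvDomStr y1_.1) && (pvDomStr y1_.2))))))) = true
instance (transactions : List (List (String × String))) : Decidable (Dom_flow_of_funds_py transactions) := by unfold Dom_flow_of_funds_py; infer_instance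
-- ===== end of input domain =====

-- B drops the Counter/dict entirely: it materialises the (src,dst) pair list, dedups it in
-- first-occurrence order, and picks the top 5 by repeated first-maximum selection with counts
-- recomputed via list.count (objective: alternative; not faster).


-- shared helpers: Python's `str(tx.get(k) or "UNKNOWN")` (None and "" are falsy; str is the
-- identity on str), the f-string template, and the no-flow message
def pvAcct (v : Option String) : String :=
  match v with
  | none => "UNKNOWN"
  | some s => if s = "" then "UNKNOWN" else s

def pvFmt (p : (String × String) × Int) : String :=
  p.1.1 ++ " -> " ++ p.1.2 ++ " (count=" ++ PySem.Int.toStr p.2 ++ ")"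

def pvMsg : String := "No clear fund flow could be derived from provided records."

-- ===== PORT A =====
-- Counter loop; most_common(5) is ported by its contract: the count-descending stable
-- sort (heapq.nlargest, documented equivalent to sorted(..., reverse=True)), cut to 5
def flow_of_funds_py (transactions : List (List (String × String))) : String :=
  let flow_counter := transactions.foldl (fun d tx =>
      let src := pvAcct ((PySem.Dict.mk tx).get? "from_account")
      let dst := pvAcct ((PySem.Dict.mk tx).get? "to_account")
      d.modify (src, dst) 0 (· + 1)) PySem.Dict.empty
  let top_flows := (PySem.List.sorted flow_counter.items (fun kv => kv.2) true).take 5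
  if top_flows.isEmpty then pvMsg
  else
    let flow_parts := top_flows.map pvFmt
    PySem.Str.join "; " flow_parts

-- ===== PORT B =====
-- pairs.count(p), Python's int
def pvCnt (pairs : List (String × String)) (p : String × String) : Int :=
  (PySem.List.count pairs p : Int)

-- the `for _ in range(5)` selection loop: first element of maximal count (strict-> replace,
-- exactly B's inner `for p in remaining[1:]` scan), list.remove (= erase: first match,
-- present by construction), recurse on the fuel
def pvSelect (pairs : List (String × String)) : Nat → List (String × String) → List String
  | 0, _ => []
  | _ + 1, [] => []
  | k + 1, r0 :: rest =>
      let best := rest.foldl (fun b p => if pvCnt pairs b < pvCnt pairs p then p else b) r0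
      pvFmt (best, pvCnt pairs best) :: pvSelect pairs k ((r0 :: rest).erase best)

def flow_of_funds_py_alt (transactions : List (List (String × String))) : String :=
  let pairs := transactions.map (fun tx =>
      (pvAcct ((PySem.Dict.mk tx).get? "from_account"),
       pvAcct ((PySem.Dict.mk tx).get? "to_account")))
  if pairs.isEmpty then pvMsg
  else PySem.Str.join "; " (pvSelect pairs 5 (PySem.List.dedup pairs))

-- ===== PRECONDITION & SPEC =====
def Spec_flow_of_funds_py (transactions : List (List (String × String))) (out : String) : Prop := out = flow_of_funds_py_alt transactions
instance (transactions : List (List (String × String))) (out : String) : Decidable (Spec_flow_of_funds_py transactions out) := by unfold Spec_flow_of_funds_py; infer_instance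

-- ===== CLAIM (what is proved, stated in full; the proofs are below) =====
def Claim_equal_flow_of_funds_py : Prop := ∀ (transactions : List (List (String × String))), Dom_flow_of_funds_py transactions → Spec_flow_of_funds_py transactions (flow_of_funds_py transactions)

-- ===== LEMMAS AND PROOFS =====

-- insertBy unfolding equations (definitional)
theorem pv_insertBy_nil {α : Type} (before : α → α → Bool) (x : α) :
    PySem.List.insertBy before x [] = [x] := rfl

theorem pv_insertBy_cons {α : Type} (before : α → α → Bool) (x y : α) (ys : List α) :
    PySem.List.insertBy before x (y :: ys)
      = if before x y then x :: y :: ys else y :: PySem.List.insertBy before x ys := rfl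

-- appending one element to the input of the stable descending sort inserts it
theorem pv_sorted_rev_append_singleton {α : Type} (L : List α) (x : α) (key : α → Int) :
    PySem.List.sorted (L ++ [x]) key true
      = PySem.List.insertBy (fun a b => decide (key b < key a)) x (PySem.List.sorted L key true) := by
  rw [PySem.List.sorted_rev_eq_foldl_insertBy, PySem.List.sorted_rev_eq_foldl_insertBy,
    List.foldl_append]
  rfl

-- max? of L ++ [x] from max? of L
theorem pv_max?_append_singleton {α : Type} (L : List α) (x m : α) (key : α → Int)
    (h : PySem.List.max? L key = some m) :
    PySem.List.max? (L ++ [x]) key = some (if key m < key x then x else m) := by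
  unfold PySem.List.max? at h ⊢
  rw [List.foldl_append, h]
  simp only [List.foldl]
  split_ifs <;> rfl

-- max? of a cons is B's inner scan (start at the head, replace on strictly larger key)
theorem pv_max?_cons {α : Type} (key : α → Int) (rest : List α) (r0 : α) :
    PySem.List.max? (r0 :: rest) key
      = some (rest.foldl (fun b p => if key b < key p then p else b) r0) := by
  unfold PySem.List.max?
  show List.foldl _ (some r0) rest = _
  induction rest generalizing r0 with
  | nil => rfl
  | cons p t ih =>
    simp only [List.foldl]
    split_ifs <;> rw [ih]

-- head extraction: the stable descending sort starts with the FIRST maximal element and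
-- continues with the sort of the list with that occurrence removed
theorem pv_sorted_rev_head {α : Type} [BEq α] [LawfulBEq α] (key : α → Int) (L : List α) (m : α)
    (h : PySem.List.max? L key = some m) :
    PySem.List.sorted L key true = m :: PySem.List.sorted (L.erase m) key true := by
  induction L using List.reverseRecOn generalizing m with
  | nil => simp [PySem.List.max?] at h
  | append_singleton L x ih =>
    rcases eq_or_ne L [] with rfl | hL
    · simp only [List.nil_append] at h ⊢
      unfold PySem.List.max? at h
      simp only [List.foldl] at h
      cases h
      simp [PySem.List.sorted, pv_insertBy_nil, List.erase_cons_head]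
    · obtain ⟨m', hm'⟩ : ∃ m', PySem.List.max? L key = some m' := by
        cases hmx : PySem.List.max? L key with
        | none => exact absurd ((PySem.List.max?_eq_none_iff L key).mp hmx) hL
        | some v => exact ⟨v, rfl⟩
      rw [pv_max?_append_singleton L x m' key hm'] at h
      rw [pv_sorted_rev_append_singleton, ih m' hm']
      by_cases hlt : key m' < key x
      · rw [if_pos hlt] at h
        obtain rfl : x = m := by injection h
        have hnot : x ∉ L := fun hmem => absurd (PySem.List.max?_isMax hm' x hmem) (not_le.mpr hlt)
        rw [List.erase_append_right _ hnot, List.erase_cons_head, List.append_nil]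
        rw [ih m' hm']
        rw [pv_insertBy_cons, if_pos (by simpa using hlt)]
      · rw [if_neg hlt] at h
        obtain rfl : m' = m := by injection h
        rw [List.erase_append_left _ (PySem.List.max?_mem hm'),
          pv_sorted_rev_append_singleton]
        rw [pv_insertBy_cons, if_neg (by simpa using hlt)]

-- sorting a mapped list with a key that factors through the map
theorem pv_sorted_rev_map {α β : Type} (g : α → β) (key : β → Int) (L : List α) :
    PySem.List.sorted (L.map g) key true
      = (PySem.List.sorted L (fun a => key (g a)) true).map g := by
  rw [PySem.List.sorted_rev_eq_foldl_insertBy, PySem.List.sorted_rev_eq_foldl_insertBy]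
  suffices hgen : ∀ (M : List α) (acc : List α),
      List.foldl (fun acc x => PySem.List.insertBy (fun a b => decide (key b < key a)) x acc)
          (acc.map g) (M.map g)
        = (List.foldl (fun acc x =>
            PySem.List.insertBy (fun a b => decide (key (g b) < key (g a))) x acc) acc M).map g by
    simpa using hgen L []
  intro M
  induction M with
  | nil => intro acc; rfl
  | cons x t ih =>
    intro acc
    simp only [List.map_cons, List.foldl_cons]
    rw [← ih]
    congr 1
    induction acc with
    | nil => rfl
    | cons a s iha =>
      simp only [List.map_cons, pv_insertBy_cons]
      by_cases hb : key (g a) < key (g x)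
      · rw [if_pos (by simpa using hb), if_pos (by simpa using hb)]
        simp
      · rw [if_neg (by simpa using hb), if_neg (by simpa using hb)]
        simpa using iha

-- the take-n prefix of the stable descending sort IS the n-round selection loop
theorem pv_take_sorted_eq_select (pairs : List (String × String)) :
    ∀ (n : Nat) (D : List (String × String)),
      ((PySem.List.sorted D (pvCnt pairs) true).take n).map (fun k => pvFmt (k, pvCnt pairs k))
        = pvSelect pairs n D := by
  intro n
  induction n with
  | zero => intro D; simp [pvSelect]
  | succ k ih =>
    intro D
    cases D with
    | nil => simp [pvSelect, PySem.List.sorted]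
    | cons r0 rest =>
      rw [pv_sorted_rev_head (pvCnt pairs) (r0 :: rest) _ (pv_max?_cons (pvCnt pairs) rest r0)]
      simp only [List.take_succ_cons, List.map_cons, pvSelect]
      rw [ih]

-- both aggregation stages yield Counter(pairs): A's modify-loop directly, B's pair list via items_counter
theorem pv_counter_A (transactions : List (List (String × String))) :
    transactions.foldl (fun d tx =>
        let src := pvAcct ((PySem.Dict.mk tx).get? "from_account")
        let dst := pvAcct ((PySem.Dict.mk tx).get? "to_account")
        d.modify (src, dst) 0 (· + 1)) PySem.Dict.empty
      = PySem.Dict.counter (transactions.map (fun tx =>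
          (pvAcct ((PySem.Dict.mk tx).get? "from_account"),
           pvAcct ((PySem.Dict.mk tx).get? "to_account")))) := by
  rw [PySem.Dict.counter_eq_foldl, List.foldl_map]

-- the selection-and-format tail: A's sorted-items take-5 agrees with B's selection loop
theorem pv_tail (pairs : List (String × String)) :
    (if ((PySem.List.sorted (PySem.Dict.counter pairs).items (fun kv => kv.2) true).take 5).isEmpty
       then pvMsg
       else PySem.Str.join "; "
         (((PySem.List.sorted (PySem.Dict.counter pairs).items (fun kv => kv.2) true).take 5).map pvFmt))
    = (if pairs.isEmpty then pvMsg
       else PySem.Str.join "; " (pvSelect pairs 5 (PySem.List.dedup pairs))) := by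
  have hmap : (fun k => (k, (List.count k pairs : Int))) = fun k => (k, pvCnt pairs k) := by
    funext k; simp [pvCnt, PySem.List.count_eq]
  rw [PySem.Dict.items_counter, hmap,
    pv_sorted_rev_map (fun k => (k, pvCnt pairs k)) (fun kv => kv.2)]
  rcases eq_or_ne pairs [] with rfl | hne
  · rfl
  · have hDne : PySem.Set.ofList pairs ≠ [] := by
      cases hp : pairs with
      | nil => exact absurd hp hne
      | cons a t =>
        subst hp
        intro hD0
        have ha : a ∈ PySem.List.dedup (a :: t) := by
          rw [PySem.List.mem_dedup]; simp
        rw [PySem.List.dedup_eq_ofList, hD0] at ha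
        simp at ha
    have hSne : PySem.List.sorted (PySem.Set.ofList pairs)
        (fun a => (fun kv : (String × String) × Int => kv.2) ((fun k => (k, pvCnt pairs k)) a)) true ≠ [] := by
      simpa [PySem.List.sorted_eq_nil_iff] using hDne
    rw [if_neg (by simp [List.isEmpty_iff, List.take_eq_nil_iff, hSne]),
      if_neg (by simp [List.isEmpty_iff, hne])]
    congr 1
    rw [← PySem.List.dedup_eq_ofList, ← pv_take_sorted_eq_select pairs 5 (PySem.List.dedup pairs)]
    rw [← List.map_take, List.map_map, PySem.List.dedup_eq_ofList]
    rfl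

-- ===== VERDICT (by name: the statement is the Claim_ definition above) =====
theorem flow_of_funds_py_spec : Claim_equal_flow_of_funds_py := by
  intro transactions _
  unfold Spec_flow_of_funds_py flow_of_funds_py flow_of_funds_py_alt
  rw [pv_counter_A]
  exact pv_tail _
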